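-- pv_equiv track=rewrite | github.com/sojournre/python-coding-test | programmers/2022 토스 Next/1.py | solution
-- ===== SOURCE A (Python) =====
-- def solution(s):
--     answer = 0
--     for i in range(len(s) - 2):
--         if s[i] == s[i + 1] and s[i + 1] == s[i + 2]:
--             answer = max(answer, int(s[i:i + 3]))
--
--     if answer == 0:
--         answer = -1
--     if answer == "000":
--         answer = 0
--
--     return answer
-- ===== SOURCE B (Python) =====
-- def solution(s):
--     # run-length scan over maximal runs instead of A's index-window loop
--     answer = 0
--     i = 0
--     n = len(s)
--     while i < n:
--         j = i
--         while j < n and s[j] == s[i]: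
--             j += 1
--         if j - i >= 3:
--             answer = max(answer, int(s[i] * 3))
--         i = j
--     if answer == 0:
--         answer = -1
--     return answer
-- ===== Notes on version B (the rewrite author's own statement) =====
-- stated objective: alternative
-- what changed: Replaces A's sliding 3-index window (re-parsing int(s[i:i+3]) at every position of a long run) with a single run-length scan over maximal runs of identical characters, converting each qualifying run's character once.
import Mathlib
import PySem

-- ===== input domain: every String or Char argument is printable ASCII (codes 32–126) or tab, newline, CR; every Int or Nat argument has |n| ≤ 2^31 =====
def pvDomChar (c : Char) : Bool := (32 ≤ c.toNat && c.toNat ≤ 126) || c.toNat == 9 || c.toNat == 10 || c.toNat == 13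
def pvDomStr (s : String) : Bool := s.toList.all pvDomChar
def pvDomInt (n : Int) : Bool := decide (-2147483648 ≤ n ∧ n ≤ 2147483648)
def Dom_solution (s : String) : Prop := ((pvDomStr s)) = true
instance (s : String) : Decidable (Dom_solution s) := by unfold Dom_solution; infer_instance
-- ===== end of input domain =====

-- B replaces A's sliding three-index window with a run-length scan over maximal runs
-- of identical characters (alternative decomposition, same asymptotic cost).

-- ===== PORT A =====
-- literal port of A: for i in range(len(s)-2): if s[i]==s[i+1] and s[i+1]==s[i+2]: answer=max(answer,int(s[i:i+3]))
-- (A's `if answer == "000"` compares an int with a str, hence is always False and has no effect; not ported.)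
def solution (s : String) : Int :=
  let l := s.toList
  let answer :=
    (PySem.List.pyRange 0 ((l.length : Int) - 2) 1).foldl
      (fun answer i =>
        if PySem.List.pyGet? l i = PySem.List.pyGet? l (i + 1) ∧
           PySem.List.pyGet? l (i + 1) = PySem.List.pyGet? l (i + 2) then
          max answer ((PySem.Int.ofChars? (PySem.List.slice l (some i) (some (i + 3)))).getD 0)
        else answer)
      0
  if answer = 0 then -1 else answer

-- ===== PORT B =====
-- Source B's outer while loop: each step consumes one maximal run of the list
-- (the inner while counts the run: its length is 1 + the take-while block of the tail).
def altScan : List Char → Int → Int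
  | [], answer => answer
  | c :: rest, answer =>
      let answer :=
        if 3 ≤ (rest.takeWhile (· == c)).length + 1 then
          max answer ((PySem.Int.ofChars? [c, c, c]).getD 0)
        else answer
      altScan (rest.dropWhile (· == c)) answer
termination_by l => l.length
decreasing_by
  simp only [List.length_cons]
  exact Nat.lt_succ_of_le (List.length_dropWhile_le _ _)

def solution_alt (s : String) : Int :=
  let answer := altScan s.toList 0
  if answer = 0 then -1 else answer

-- ===== PRECONDITION & SPEC =====
-- Pre_ excludes exactly the strings containing three equal consecutive non-digit characters:
-- there Python's int(...) raises ValueError, in A and in B alike.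
def Pre_solution (s : String) : Prop :=
  ∀ i : Nat, i < s.toList.length →
    s.toList[i]? = s.toList[i + 1]? → s.toList[i + 1]? = s.toList[i + 2]? →
    (s.toList.getD i '0').isDigit = true
instance (s : String) : Decidable (Pre_solution s) := by unfold Pre_solution; infer_instance

def pvWitness_solution : String := "aa111bb9"

def Spec_solution (s : String) (out : Int) : Prop := out = solution_alt s
instance (s : String) (out : Int) : Decidable (Spec_solution s out) := by unfold Spec_solution; infer_instance

-- ===== CLAIM (what is proved, stated in full; the proofs are below) =====
def Claim_equal_solution : Prop := ∀ (s : String), Dom_solution s → Pre_solution s → Spec_solution s (solution s)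

-- ===== LEMMAS AND PROOFS =====

-- the value A/B parse from a qualifying triple of character c
def vv (c : Char) : Int := (PySem.Int.ofChars? [c, c, c]).getD 0

-- the qualifying values of A's window loop, as filter+map over the index range
def valsA (l : List Char) : List Int :=
  ((List.range (l.length - 2)).filter
    (fun k => l[k]? == l[k + 1]? && l[k + 1]? == l[k + 2]?)).map
    (fun k => (PySem.Int.ofChars? ((l.drop k).take 3)).getD 0)

-- the qualifying values of B's run scan
def runsVals : List Char → List Int
  | [] => []
  | c :: rest =>
      (if 3 ≤ (rest.takeWhile (· == c)).length + 1 then [vv c] else [])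
        ++ runsVals (rest.dropWhile (· == c))
termination_by l => l.length
decreasing_by
  simp only [List.length_cons]
  exact Nat.lt_succ_of_le (List.length_dropWhile_le _ _)

lemma foldl_ite_max (p : Nat → Bool) (f : Nat → Int) :
    ∀ (xs : List Nat) (a : Int),
      xs.foldl (fun a k => if p k then max a (f k) else a) a
        = ((xs.filter p).map f).foldl max a := by
  intro xs
  induction xs with
  | nil => simp
  | cons x t ih =>
    intro a
    by_cases h : p x = true <;> simp [h, ih]

lemma loopA_eq (l : List Char) :
    (PySem.List.pyRange 0 ((l.length : Int) - 2) 1).foldl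
      (fun answer i =>
        if PySem.List.pyGet? l i = PySem.List.pyGet? l (i + 1) ∧
           PySem.List.pyGet? l (i + 1) = PySem.List.pyGet? l (i + 2) then
          max answer ((PySem.Int.ofChars? (PySem.List.slice l (some i) (some (i + 3)))).getD 0)
        else answer)
      0 = (valsA l).foldl max 0 := by
  rw [PySem.List.pyRange_one, List.foldl_map]
  have hn : ((l.length : Int) - 2 - 0).toNat = l.length - 2 := by omega
  rw [hn]
  unfold valsA
  rw [← foldl_ite_max]
  apply List.foldl_ext
  intro a k hk
  have h1 : PySem.List.pyGet? l ((0 : Int) + (k : Int)) = l[k]? := by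
    rw [zero_add, PySem.List.pyGet?_natCast]
  have h2 : (0 : Int) + (k : Int) + 1 = ((k + 1 : Nat) : Int) := by push_cast; ring
  have h3 : (0 : Int) + (k : Int) + 2 = ((k + 2 : Nat) : Int) := by push_cast; ring
  have h4 : PySem.List.slice l (some ((0 : Int) + (k : Int))) (some ((0 : Int) + (k : Int) + 3))
      = (l.drop k).take 3 := by
    rw [zero_add, show (k : Int) + 3 = (k : Int) + ((3 : Nat) : Int) by push_cast; ring,
        PySem.List.slice_natCast_add]
  rw [h2, h3, h4, h1, PySem.List.pyGet?_natCast, PySem.List.pyGet?_natCast]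
  by_cases hc : l[k]? = l[k + 1]? ∧ l[k + 1]? = l[k + 2]?
  · rw [if_pos hc, if_pos (by simp [hc.1, hc.2])]
  · rw [if_neg hc, if_neg ?_]
    simp only [Bool.and_eq_true, beq_iff_eq]
    tauto

lemma drop_triple (l : List Char) (k : Nat) (h : k + 2 < l.length) :
    l.drop k = l[k] :: l[k + 1] :: l[k + 2] :: l.drop (k + 3) := by
  rw [List.drop_eq_getElem_cons (by omega), List.drop_eq_getElem_cons (by omega),
      List.drop_eq_getElem_cons (by omega)]

lemma mem_valsA (l : List Char) (x : Int) :
    x ∈ valsA l ↔ ∃ c, [c, c, c] <:+: l ∧ x = vv c := by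
  simp only [valsA, List.mem_map, List.mem_filter, List.mem_range]
  constructor
  · rintro ⟨k, ⟨hk, hcond⟩, rfl⟩
    have h2 : k + 2 < l.length := by omega
    simp only [Bool.and_eq_true, beq_iff_eq,
      List.getElem?_eq_getElem (by omega : k < l.length),
      List.getElem?_eq_getElem (by omega : k + 1 < l.length),
      List.getElem?_eq_getElem h2, Option.some.injEq] at hcond
    refine ⟨l[k], ⟨l.take k, l.drop (k + 3), ?_⟩, ?_⟩
    · conv_rhs => rw [← List.take_append_drop k l]
      rw [drop_triple l k h2, ← hcond.2, ← hcond.1]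
      simp
    · rw [drop_triple l k h2, ← hcond.2, ← hcond.1, vv]
      simp
  · rintro ⟨c, ⟨p, q, hpq⟩, rfl⟩
    subst hpq
    have key : ∀ j, j < 3 → (p ++ [c, c, c] ++ q)[p.length + j]? = some c := by
      intro j hj
      rw [List.append_assoc, List.getElem?_append_right (by omega)]
      have hij : p.length + j - p.length = j := by omega
      rw [hij]
      interval_cases j <;> rfl
    refine ⟨p.length, ⟨by simp [List.length_append]; omega, ?_⟩, ?_⟩
    · have e0 := key 0 (by omega)
      have e1 := key 1 (by omega)
      have e2 := key 2 (by omega)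
      rw [Nat.add_zero] at e0
      simp only [Bool.and_eq_true, beq_iff_eq, e0, e1, e2]
      simp
    · have hd : (p ++ [c, c, c] ++ q).drop p.length = [c, c, c] ++ q := by
        rw [List.append_assoc, List.drop_left]
      rw [hd]
      simp [vv]

lemma altScan_eq (l : List Char) : ∀ a : Int, altScan l a = (runsVals l).foldl max a := by
  induction l using runsVals.induct with
  | case1 => intro a; simp [altScan, runsVals]
  | case2 c rest ih =>
    intro a
    rw [altScan, runsVals, List.foldl_append, ih]
    by_cases h : 3 ≤ (rest.takeWhile (· == c)).length + 1 <;> simp [h, vv]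

lemma infix_dropWhile_or (c c' : Char) :
    ∀ l : List Char, [c', c', c'] <:+: l →
      [c', c', c'] <:+: l.dropWhile (· == c) ∨ (c' = c ∧ 3 ≤ (l.takeWhile (· == c)).length) := by
  intro l
  induction l with
  | nil => intro h; exact absurd (List.IsInfix.length_le h) (by simp)
  | cons a t ih =>
    intro h
    by_cases ha : a = c
    · subst ha
      rcases List.infix_cons_iff.mp h with hp | hi
      · rcases hp with ⟨r, hr⟩
        simp only [List.cons_append, List.cons.injEq] at hr
        obtain ⟨hc', ht⟩ := hr
        refine Or.inr ⟨hc', ?_⟩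
        subst hc' ht
        simp
      · rcases ih hi with h' | ⟨hc, hlen⟩
        · left; simpa [List.dropWhile_cons] using h'
        · right; exact ⟨hc, by simp; omega⟩
    · left
      simpa [List.dropWhile_cons, ha] using h

lemma triple_prefix_of_takeWhile (c : Char) (rest : List Char)
    (h : 2 ≤ (rest.takeWhile (· == c)).length) : [c, c, c] <:+: c :: rest := by
  match e : rest.takeWhile (· == c) with
  | [] => rw [e] at h; simp at h
  | [a] => rw [e] at h; simp at h
  | a :: b :: w =>
    have ha : a = c := by
      have : a ∈ rest.takeWhile (· == c) := by rw [e]; simp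
      simpa using List.mem_takeWhile_imp this
    have hb : b = c := by
      have : b ∈ rest.takeWhile (· == c) := by rw [e]; simp
      simpa using List.mem_takeWhile_imp this
    obtain ⟨d, hd⟩ : ∃ d, rest.dropWhile (· == c) = d := ⟨_, rfl⟩
    have hrest : rest = a :: b :: (w ++ d) := by
      conv_lhs => rw [← List.takeWhile_append_dropWhile (p := (· == c)) (l := rest)]
      rw [e, hd]; simp
    exact ⟨[], w ++ d, by rw [hrest, ha, hb]; simp⟩

lemma infix_cons_of_infix_dropWhile (c c' : Char) (rest : List Char)
    (h : [c', c', c'] <:+: rest.dropWhile (· == c)) : [c', c', c'] <:+: c :: rest :=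
  h.trans ((rest.dropWhile_suffix (· == c)).isInfix.trans
    (List.infix_cons_iff.mpr (Or.inr (List.infix_refl rest))))

lemma mem_runsVals (l : List Char) (x : Int) :
    x ∈ runsVals l ↔ ∃ c, [c, c, c] <:+: l ∧ x = vv c := by
  induction l using runsVals.induct with
  | case1 =>
    simp only [runsVals, List.not_mem_nil, false_iff, not_exists]
    rintro c ⟨hinf, -⟩
    exact absurd (List.IsInfix.length_le hinf) (by simp)
  | case2 c rest ih =>
    rw [runsVals]
    by_cases hcond : 3 ≤ (rest.takeWhile (· == c)).length + 1
    · simp only [if_pos hcond, List.mem_append, List.mem_singleton, ih]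
      constructor
      · rintro (rfl | ⟨c', hinf, rfl⟩)
        · exact ⟨c, triple_prefix_of_takeWhile c rest (by omega), rfl⟩
        · exact ⟨c', infix_cons_of_infix_dropWhile c c' rest hinf, rfl⟩
      · rintro ⟨c', hinf, rfl⟩
        rcases infix_dropWhile_or c c' (c :: rest) hinf with h' | ⟨rfl, -⟩
        · right
          refine ⟨c', ?_, rfl⟩
          simpa [List.dropWhile_cons] using h'
        · exact Or.inl rfl
    · simp only [if_neg hcond, List.nil_append, ih]
      constructor
      · rintro ⟨c', hinf, rfl⟩
        exact ⟨c', infix_cons_of_infix_dropWhile c c' rest hinf, rfl⟩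
      · rintro ⟨c', hinf, rfl⟩
        rcases infix_dropWhile_or c c' (c :: rest) hinf with h' | ⟨rfl, hlen⟩
        · refine ⟨c', ?_, rfl⟩
          simpa [List.dropWhile_cons] using h'
        · exfalso; apply hcond
          simpa using hlen

lemma foldl_max_eq_of_mem_iff (xs ys : List Int) (a : Int)
    (h : ∀ x, x ∈ xs ↔ x ∈ ys) : xs.foldl max a = ys.foldl max a := by
  refine le_antisymm ?_ ?_ <;>
  · rcases PySem.List.foldl_max_mem _ a with hm | hm
    · rw [hm]; exact (PySem.List.le_foldl_max _ a).1
    · first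
      | exact (PySem.List.le_foldl_max ys a).2 _ ((h _).1 hm)
      | exact (PySem.List.le_foldl_max xs a).2 _ ((h _).2 hm)

-- ===== VERDICT (by name: the statement is the Claim_ definition above) =====
theorem solution_spec : Claim_equal_solution := by
  intro s _ _
  unfold Spec_solution solution solution_alt
  simp only [loopA_eq, altScan_eq]
  rw [foldl_max_eq_of_mem_iff (valsA s.toList) (runsVals s.toList) 0
      (fun x => (mem_valsA _ _).trans (mem_runsVals _ _).symm)]
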